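-- pv_equiv track=rewrite | github.com/clarencew0083/recSystem | inst/python/_02_my_functions.py | find_ranks
-- ===== SOURCE A (Python) =====
-- def find_ranks(performance_dict, return_sorted = False):
--     """ Function to find rankings of the algorithms
--
--         Parameters
--         ---------
--             performance_dict: dictionary
--                 performances calculated per algorithm
--             return_sorted = boolean
--                 False: return ranks ordered by order of algorithms in calculate_accuracies function
--                 True: return ranks ordered from highest to lowest
--
--         Returns
--         -------
--             dictionary, where keys are algorithms and values are ranks
--     """
--     perf = performance_dict.copy()
--     ranks_dict = {key: rank for rank, key in enumerate(sorted(set(perf.values()), reverse=True), 1)}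
--     ranks = {k: ranks_dict[v] for k,v, in perf.items()} # unordered ranks
--
--     if return_sorted == True:
--         num = 1
--         ranks_ordered = {}
--         ranks_temp = ranks.copy()
--         while num != len(ranks)+1:
--             h_rank = min(ranks_temp.items(), key=lambda x: x[1]) # find key, value with highest rank
--             ranks_ordered[h_rank[0]] = h_rank[1] # add key, value to new dictionary
--             ranks_temp.pop(h_rank[0]) # remove key, value from temp dictionary
--             num = num + 1 # update indicator
--         return ranks_ordered
--     else:
--         return ranks
-- ===== SOURCE B (Python) =====
-- def find_ranks(performance_dict, return_sorted = False):
--     """Dense-rank algorithms by performance: one stable descending sort plus a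
--     single change-detecting pass (no distinct-value index table, no repeated min/pop)."""
--     items = sorted(performance_dict.items(), key=lambda kv: kv[1], reverse=True)
--     ranked = {}
--     rank = 0
--     prev = None
--     for k, v in items:
--         if v != prev:
--             rank += 1
--             prev = v
--         ranked[k] = rank
--     if return_sorted == True:
--         return ranked
--     return {k: ranked[k] for k in performance_dict}
-- ===== Notes on version B (the rewrite author's own statement) =====
-- stated objective: simpler
-- what changed: A builds a rank table from sorted(set(values)) and then, for the sorted output, repeatedly scans the remaining dict with min() and pops the winner (quadratic selection); B does one stable descending sort of the items and assigns dense ranks in a single change-detecting pass, rebuilding insertion order by lookup for the unsorted output.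
import Mathlib
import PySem

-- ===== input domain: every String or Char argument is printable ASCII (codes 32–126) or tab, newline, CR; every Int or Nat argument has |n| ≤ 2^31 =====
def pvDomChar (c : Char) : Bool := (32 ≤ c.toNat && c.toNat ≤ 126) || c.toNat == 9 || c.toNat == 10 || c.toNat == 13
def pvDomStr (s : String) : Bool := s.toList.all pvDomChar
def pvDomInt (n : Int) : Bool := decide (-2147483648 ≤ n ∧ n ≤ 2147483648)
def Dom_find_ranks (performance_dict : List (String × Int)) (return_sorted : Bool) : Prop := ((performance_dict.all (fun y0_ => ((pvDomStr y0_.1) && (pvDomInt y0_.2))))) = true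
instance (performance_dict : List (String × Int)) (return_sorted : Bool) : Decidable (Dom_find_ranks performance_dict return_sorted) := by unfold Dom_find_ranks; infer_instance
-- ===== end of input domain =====

-- B replaces A's distinct-value index table plus repeated min/pop selection by one stable
-- descending sort and a single change-detecting pass (objective: simpler structure).

-- ===== PORT A =====
-- {key: rank for rank, key in enumerate(sorted(set(perf.values()), reverse=True), 1)}
def aEnum : List Int → Int → List (Int × Int)
  | [], _ => []
  | v :: rest, r => (v, r) :: aEnum rest (r + 1)

-- the 'while num != len(ranks)+1' selection loop, fuel = number of iterations
def aLoop : Nat → PySem.Dict String Int → List (String × Int) → List (String × Int)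
  | 0, _, ranks_ordered => ranks_ordered
  | n + 1, ranks_temp, ranks_ordered =>
    match PySem.List.min? ranks_temp.items (fun x => x.2) with
    | none => ranks_ordered  -- unreachable: fuel = length of ranks_temp
    | some h_rank => aLoop n (ranks_temp.erase h_rank.1) (ranks_ordered ++ [h_rank])

def find_ranks (performance_dict : List (String × Int)) (return_sorted : Bool) : List (String × Int) :=
  let perf := performance_dict
  let ranks_dict : PySem.Dict Int Int :=
    ⟨aEnum (PySem.List.sorted (PySem.Set.ofList (perf.map (fun p => p.2))) (fun x => x) true) 1⟩
  -- KeyError impossible: every value of perf is in ranks_dict, so getD's default is never used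
  let ranks := perf.map (fun kv => (kv.1, PySem.Dict.getD ranks_dict kv.2 0))
  if return_sorted = true then
    aLoop ranks.length ⟨ranks⟩ []
  else
    ranks

-- ===== PORT B =====
-- single change-detecting pass over the descending-sorted items
def bAssign : List (String × Int) → Int → Option Int → List (String × Int)
  | [], _, _ => []
  | (k, v) :: rest, rank, prev =>
    let rank' := if prev = some v then rank else rank + 1
    (k, rank') :: bAssign rest rank' (some v)

def find_ranks_alt (performance_dict : List (String × Int)) (return_sorted : Bool) : List (String × Int) :=
  let items := PySem.List.sorted performance_dict (fun kv => kv.2) true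
  let ranked := bAssign items 0 none
  if return_sorted = true then
    ranked
  else
    performance_dict.map (fun kv => (kv.1, PySem.Dict.getD ⟨ranked⟩ kv.1 0))

-- ===== PRECONDITION & SPEC =====
-- Pre_ only requires the association list to have pairwise-distinct keys: the argument is a
-- Python dict, whose keys are always distinct, so this excludes no input the Python A accepts.
def Pre_find_ranks (performance_dict : List (String × Int)) (return_sorted : Bool) : Prop :=
  (performance_dict.map (fun kv => kv.1)).Nodup

instance (performance_dict : List (String × Int)) (return_sorted : Bool) : Decidable (Pre_find_ranks performance_dict return_sorted) := by unfold Pre_find_ranks; infer_instance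

def pvWitness_find_ranks : (List (String × Int)) × Bool := ([("a", 3), ("b", 1), ("c", 3)], true)

def Spec_find_ranks (performance_dict : List (String × Int)) (return_sorted : Bool) (out : List (String × Int)) : Prop := out = find_ranks_alt performance_dict return_sorted
instance (performance_dict : List (String × Int)) (return_sorted : Bool) (out : List (String × Int)) : Decidable (Spec_find_ranks performance_dict return_sorted out) := by unfold Spec_find_ranks; infer_instance

-- ===== CLAIM (what is proved, stated in full; the proofs are below) =====
def Claim_equal_find_ranks : Prop := ∀ (performance_dict : List (String × Int)) (return_sorted : Bool), Dom_find_ranks performance_dict return_sorted → Pre_find_ranks performance_dict return_sorted → Spec_find_ranks performance_dict return_sorted (find_ranks performance_dict return_sorted)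

-- ===== LEMMAS AND PROOFS =====

-- abbreviations for A's pieces
def pvDvals (pd : List (String × Int)) : List Int :=
  PySem.List.sorted (PySem.Set.ofList (pd.map (fun p => p.2))) (fun x => x) true

def pvG (pd : List (String × Int)) (v : Int) : Int :=
  PySem.Dict.getD ⟨aEnum (pvDvals pd) 1⟩ v 0

def pvF (pd : List (String × Int)) (kv : String × Int) : String × Int := (kv.1, pvG pd kv.2)

def pvS (pd : List (String × Int)) : List (String × Int) :=
  PySem.List.sorted pd (fun kv => kv.2) true

-- select-by-min loop = ascending stable sort
theorem insertBy_cons_of_before {α : Type} (b : α → α → Bool) (x : α) (l : List α)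
    (h : ∀ e ∈ l.head?.toList, b x e = true) :
    PySem.List.insertBy b x l = x :: l := by
  cases l with
  | nil => simp [PySem.List.insertBy]
  | cons y ys =>
      have hy : b x y = true := h y (by simp)
      simp [PySem.List.insertBy, hy]

theorem foldl_min_head {α κ : Type} [LinearOrder κ] (key : α → κ) :
    ∀ (xs acc : List α), List.Pairwise (fun a b => key a ≤ key b) acc →
      List.foldl (fun acc x => match acc with
        | none => some x
        | some m => if key x < key m then some x else some m) acc.head? xs
      = (List.foldl (fun acc x => PySem.List.insertBy (fun a b => decide (key a < key b)) x acc) acc xs).head? := by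
  intro xs
  induction xs with
  | nil => intro acc _; rfl
  | cons x xs ih =>
      intro acc hacc
      have hstep : (match acc.head? with
          | none => some x
          | some m => if key x < key m then some x else some m)
          = (PySem.List.insertBy (fun a b => decide (key a < key b)) x acc).head? := by
        cases acc with
        | nil => simp [PySem.List.insertBy]
        | cons y t =>
            by_cases hxy : key x < key y <;>
              simp [PySem.List.insertBy, hxy]
      simpa [List.foldl_cons, hstep] using
        ih (PySem.List.insertBy (fun a b => decide (key a < key b)) x acc)
          (PySem.List.insertBy_pairwise_le key x acc hacc)

theorem min?_eq_head_sorted {α κ : Type} [LinearOrder κ] (xs : List α) (key : α → κ) :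
    PySem.List.min? xs key = (PySem.List.sorted xs key false).head? := by
  rw [PySem.List.sorted_eq_foldl_insertBy]
  simpa [PySem.List.min?] using foldl_min_head key xs [] (by simp)

theorem filter_insertBy {α κ : Type} [LinearOrder κ] (key : α → κ) (p : α → Bool) (x : α) :
    ∀ acc : List α, List.Pairwise (fun a b => key a ≤ key b) acc →
      (PySem.List.insertBy (fun a b => decide (key a < key b)) x acc).filter p
      = if p x then PySem.List.insertBy (fun a b => decide (key a < key b)) x (acc.filter p)
        else acc.filter p := by
  intro acc
  induction acc with
  | nil => intro _; cases hpx : p x <;> simp [PySem.List.insertBy, hpx]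
  | cons y t ih =>
      intro hp
      have hy : ∀ z ∈ t, key y ≤ key z := fun z hz => (List.pairwise_cons.mp hp).1 z hz
      have ht : List.Pairwise (fun a b => key a ≤ key b) t := (List.pairwise_cons.mp hp).2
      by_cases hxy : key x < key y
      · -- x goes in front; in the filtered list it also goes in front
        have hfront : PySem.List.insertBy (fun a b => decide (key a < key b)) x ((y :: t).filter p)
            = x :: (y :: t).filter p := by
          apply insertBy_cons_of_before
          intro e he
          have he' : e ∈ (y :: t).filter p := by
            cases hf : ((y :: t).filter p) with
            | nil => simp [hf] at he
            | cons a l => simp [hf] at he ⊢; simp [he]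
          have hem : e ∈ y :: t := List.mem_of_mem_filter he'
          have : key y ≤ key e := by
            rcases List.mem_cons.mp hem with h | h
            · exact h ▸ le_refl _
            · exact hy e h
          simpa using lt_of_lt_of_le hxy this
        simp only [PySem.List.insertBy, hxy, decide_true, if_true]
        rw [hfront, List.filter_cons]
      · simp only [PySem.List.insertBy, hxy, decide_false, Bool.false_eq_true, if_false]
        cases hpy : p y
        · simp only [List.filter_cons, hpy, Bool.false_eq_true, if_false]
          rw [ih ht]
        · simp only [List.filter_cons, hpy, if_true]
          rw [ih ht]
          cases hpx : p x
          · simp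
          · simp [PySem.List.insertBy, hxy]

theorem foldl_insertBy_filter {α κ : Type} [LinearOrder κ] (key : α → κ) (p : α → Bool) :
    ∀ (xs acc : List α), List.Pairwise (fun a b => key a ≤ key b) acc →
      List.foldl (fun acc x => PySem.List.insertBy (fun a b => decide (key a < key b)) x acc)
        (acc.filter p) (xs.filter p)
      = (List.foldl (fun acc x => PySem.List.insertBy (fun a b => decide (key a < key b)) x acc) acc xs).filter p := by
  intro xs
  induction xs with
  | nil => intro acc _; rfl
  | cons x xs ih =>
      intro acc hacc
      have hins := filter_insertBy key p x acc hacc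
      have hpw := PySem.List.insertBy_pairwise_le key x acc hacc
      cases hpx : p x
      · simp only [List.filter_cons, hpx, Bool.false_eq_true, if_false, List.foldl_cons]
        rw [← ih (PySem.List.insertBy (fun a b => decide (key a < key b)) x acc) hpw]
        rw [hins]; simp [hpx]
      · simp only [List.filter_cons, hpx, if_true, List.foldl_cons]
        rw [← ih (PySem.List.insertBy (fun a b => decide (key a < key b)) x acc) hpw]
        rw [hins]; simp [hpx]

theorem sorted_filter {α κ : Type} [LinearOrder κ] (key : α → κ) (p : α → Bool) (xs : List α) :
    PySem.List.sorted (xs.filter p) key false = (PySem.List.sorted xs key false).filter p := by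
  rw [PySem.List.sorted_eq_foldl_insertBy, PySem.List.sorted_eq_foldl_insertBy]
  simpa using foldl_insertBy_filter key p xs [] (by simp)

theorem aLoop_sorted :
    ∀ (n : Nat) (xs acc : List (String × Int)), n = xs.length →
      (xs.map (fun kv => kv.1)).Nodup →
      aLoop n ⟨xs⟩ acc = acc ++ PySem.List.sorted xs (fun kv => kv.2) false := by
  intro n
  induction n with
  | zero =>
      intro xs acc hlen _
      have hxs : xs = [] := List.eq_nil_of_length_eq_zero hlen.symm
      subst hxs
      simp [aLoop, PySem.List.sorted]
  | succ n ih =>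
      intro xs acc hlen hnd
      have hTlen : (PySem.List.sorted xs (fun kv => kv.2) false).length = n + 1 := by
        rw [PySem.List.length_sorted]; omega
      obtain ⟨t, T', hT⟩ : ∃ t T', PySem.List.sorted xs (fun kv => kv.2) false = t :: T' := by
        cases hc : PySem.List.sorted xs (fun kv => kv.2) false with
        | nil => rw [hc] at hTlen; simp at hTlen
        | cons a l => exact ⟨a, l, rfl⟩
      have hmin : PySem.List.min? xs (fun x => x.2) = some t := by
        rw [min?_eq_head_sorted xs (fun kv => kv.2), hT]; rfl
      have htmem : t ∈ xs := by
        rw [← PySem.List.mem_sorted xs (fun kv => kv.2) false, hT]; simp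
      -- the sorted list has nodup keys too
      have hperm : (PySem.List.sorted xs (fun kv => kv.2) false).Perm xs :=
        PySem.List.sorted_perm xs (fun kv => kv.2) false
      have hndT : ((t :: T').map (fun kv => kv.1)).Nodup := by
        rw [← hT]
        exact ((hperm.map (fun kv => kv.1)).nodup_iff).mpr hnd
      have hkeysT' : ∀ e ∈ T', (e.1 == t.1) = false := by
        intro e he
        have hndT2 : (t.1 :: T'.map (fun kv => kv.1)).Nodup := by simpa using hndT
        have h1 : t.1 ∉ T'.map (fun kv => kv.1) := (List.nodup_cons.mp hndT2).1
        have : e.1 ≠ t.1 := fun h => h1 (List.mem_map.mpr ⟨e, he, h⟩)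
        simpa using this
      -- the erased list
      set q : String × Int → Bool := fun e => !(e.1 == t.1) with hq
      have hfilterT : (PySem.List.sorted xs (fun kv => kv.2) false).filter q = T' := by
        rw [hT, List.filter_cons]
        have : q t = false := by simp [hq]
        rw [this]
        simp only [Bool.false_eq_true, if_false]
        exact List.filter_eq_self.mpr (fun e he => by simp [hq, hkeysT' e he])
      have hsorted_filter : PySem.List.sorted (xs.filter q) (fun kv => kv.2) false = T' := by
        rw [sorted_filter]; exact hfilterT
      have hlenq : (xs.filter q).length = n := by
        have h1 : ((PySem.List.sorted xs (fun kv => kv.2) false).filter q).length = T'.length :=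
          congrArg List.length hfilterT
        have h2 := (hperm.filter q).length_eq
        have h3 : T'.length = n := by
          rw [hT] at hTlen; simpa using hTlen
        omega
      have hndq : ((xs.filter q).map (fun kv => kv.1)).Nodup :=
        hnd.sublist (List.Sublist.map (fun kv : String × Int => kv.1)
          (List.filter_sublist (p := q) (l := xs)))
      have hstep : aLoop (n + 1) ⟨xs⟩ acc
          = aLoop n ⟨xs.filter q⟩ (acc ++ [t]) := by
        simp only [aLoop, hmin, PySem.Dict.erase]
        rfl
      rw [hstep, ih (xs.filter q) (acc ++ [t]) hlenq.symm hndq, hsorted_filter, hT]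
      simp

-- map transport: ascending sort of the ranked pairs = descending sort mapped
theorem insertBy_map {α β : Type} (f : α → β) (b1 : β → β → Bool) (b2 : α → α → Bool) (x : α) :
    ∀ acc : List α, (∀ y ∈ acc, b1 (f x) (f y) = b2 x y) →
      PySem.List.insertBy b1 (f x) (acc.map f) = (PySem.List.insertBy b2 x acc).map f := by
  intro acc
  induction acc with
  | nil => intro _; simp [PySem.List.insertBy]
  | cons y t ih =>
      intro h
      have hy : b1 (f x) (f y) = b2 x y := h y (by simp)
      by_cases hxy : b2 x y = true
      · simp [PySem.List.insertBy, hy, hxy]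
      · have hxy' : b2 x y = false := by revert hxy; cases b2 x y <;> simp
        simp only [List.map_cons, PySem.List.insertBy, hy, hxy', Bool.false_eq_true, if_false]
        rw [ih (fun z hz => h z (by simp [hz]))]

theorem foldl_insertBy_map {α β : Type} (f : α → β) (b1 : β → β → Bool) (b2 : α → α → Bool)
    (P : α → Prop) (hc : ∀ a b, P a → P b → b1 (f a) (f b) = b2 a b) :
    ∀ (xs acc : List α), (∀ x ∈ xs, P x) → (∀ y ∈ acc, P y) →
      List.foldl (fun acc x => PySem.List.insertBy b1 x acc) (acc.map f) (xs.map f)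
      = (List.foldl (fun acc x => PySem.List.insertBy b2 x acc) acc xs).map f := by
  intro xs
  induction xs with
  | nil => intro acc _ _; rfl
  | cons x xs ih =>
      intro acc hxs hacc
      have hx : P x := hxs x (by simp)
      simp only [List.map_cons, List.foldl_cons]
      rw [insertBy_map f b1 b2 x acc (fun y hy => hc x y hx (hacc y hy))]
      exact ih (PySem.List.insertBy b2 x acc) (fun z hz => hxs z (by simp [hz]))
        (fun y hy => by
          rcases (PySem.List.mem_insertBy b2 x y acc).mp hy with h | h
          · exact h ▸ hx
          · exact hacc y h)

theorem sorted_map_antitone (pd : List (String × Int)) (g : Int → Int)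
    (hg : ∀ a ∈ pd, ∀ b ∈ pd, (decide (g a.2 < g b.2) : Bool) = decide (b.2 < a.2)) :
    PySem.List.sorted (pd.map (fun kv => (kv.1, g kv.2))) (fun kv => kv.2) false
    = (PySem.List.sorted pd (fun kv => kv.2) true).map (fun kv => (kv.1, g kv.2)) := by
  rw [PySem.List.sorted_eq_foldl_insertBy, PySem.List.sorted_rev_eq_foldl_insertBy]
  have := foldl_insertBy_map (fun kv : String × Int => (kv.1, g kv.2))
      (fun a b => decide (a.2 < b.2)) (fun a b => decide (b.2 < a.2))
      (fun a => a ∈ pd) (fun a b ha hb => hg a ha b hb) pd [] (fun _ hx => hx) (by simp)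
  simpa using this

-- A's enumerate-table lookup computes 1 + (number of distinct values above v)
theorem aEnum_getD (l : List Int) (hl : List.Pairwise (fun a b => b < a) l) :
    ∀ (v : Int), v ∈ l → ∀ r : Int,
      PySem.Dict.getD ⟨aEnum l r⟩ v 0 = r + (l.countP (fun w => decide (v < w)) : Int) := by
  induction l with
  | nil => intro v hv; simp at hv
  | cons d rest ih =>
      intro v hv r
      have hd : ∀ w ∈ rest, w < d := fun w hw => (List.pairwise_cons.mp hl).1 w hw
      have hrest : List.Pairwise (fun a b => b < a) rest := (List.pairwise_cons.mp hl).2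
      rcases List.mem_cons.mp hv with hvd | hvr
      · subst hvd
        have hcount : rest.countP (fun w => decide (v < w)) = 0 := by
          rw [List.countP_eq_zero]
          intro w hw
          simp [not_lt.mpr (le_of_lt (hd w hw))]
        simp [aEnum, PySem.Dict.getD, PySem.Dict.get?_mk_cons, hcount]
      · have hvltd : v < d := hd v hvr
        have hne : (d == v) = false := by simp; exact (ne_of_gt hvltd)
        have := ih hrest v hvr (r + 1)
        simp only [aEnum, PySem.Dict.getD, PySem.Dict.get?_mk_cons, hne, Bool.false_eq_true,
          if_false]
        simp only [PySem.Dict.getD] at this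
        rw [this, List.countP_cons]
        simp [hvltd]
        ring

theorem pvG_spec (pd : List (String × Int)) :
    ∀ v ∈ pd.map (fun p => p.2),
      pvG pd v = 1 + ((pvDvals pd).countP (fun w => decide (v < w)) : Int) := by
  intro v hv
  have hmem : v ∈ pvDvals pd := by
    rw [pvDvals, PySem.List.mem_sorted, PySem.Set.mem_ofList]
    exact hv
  have hnd : (pvDvals pd).Nodup := by
    have hperm : (pvDvals pd).Perm (PySem.Set.ofList (pd.map (fun p => p.2))) :=
      PySem.List.sorted_perm _ _ _
    exact hperm.nodup_iff.mpr (PySem.Set.nodup_ofList _)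
  have hge : List.Pairwise (fun a b => b ≤ a) (pvDvals pd) := by
    have := PySem.List.sorted_pairwise_rev (PySem.Set.ofList (pd.map (fun p => p.2)))
      (fun x : Int => x)
    exact this
  have hgt : List.Pairwise (fun a b => b < a) (pvDvals pd) := by
    refine (hge.and hnd).imp ?_
    rintro a b ⟨h1, h2⟩
    exact lt_of_le_of_ne h1 (fun h => h2 h.symm)
  exact aEnum_getD (pvDvals pd) hgt v hmem 1

-- one more distinct value lies strictly between: counting is strictly antitone on members
theorem countGt_strict_anti (l : List Int) (v w : Int) (hvw : v < w) (hw : w ∈ l) :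
    l.countP (fun x => decide (w < x)) < l.countP (fun x => decide (v < x)) := by
  rw [List.countP_eq_length_filter, List.countP_eq_length_filter]
  have hsub : l.filter (fun x => decide (w < x))
      = (l.filter (fun x => decide (v < x))).filter (fun x => decide (w < x)) := by
    rw [List.filter_filter]
    apply List.filter_congr
    intro x _
    cases hx : (decide (w < x) : Bool)
    · simp
    · have : w < x := of_decide_eq_true hx
      simp [decide_eq_true (lt_trans hvw this)]
  rw [hsub]
  apply List.length_filter_lt_length_iff_exists.mpr
  exact ⟨w, List.mem_filter.mpr ⟨hw, decide_eq_true hvw⟩, by simp⟩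

theorem pvG_antitone (pd : List (String × Int)) :
    ∀ a ∈ pd, ∀ b ∈ pd, (decide (pvG pd a.2 < pvG pd b.2) : Bool) = decide (b.2 < a.2) := by
  intro a ha b hb
  have hva : a.2 ∈ pd.map (fun p => p.2) := List.mem_map.mpr ⟨a, ha, rfl⟩
  have hvb : b.2 ∈ pd.map (fun p => p.2) := List.mem_map.mpr ⟨b, hb, rfl⟩
  have hma : a.2 ∈ pvDvals pd := by
    rw [pvDvals, PySem.List.mem_sorted, PySem.Set.mem_ofList]; exact hva
  have hmb : b.2 ∈ pvDvals pd := by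
    rw [pvDvals, PySem.List.mem_sorted, PySem.Set.mem_ofList]; exact hvb
  rw [pvG_spec pd a.2 hva, pvG_spec pd b.2 hvb]
  have hiff : (1 + ((pvDvals pd).countP (fun w => decide (a.2 < w)) : Int)
      < 1 + ((pvDvals pd).countP (fun w => decide (b.2 < w)) : Int)) ↔ b.2 < a.2 := by
    constructor
    · intro h
      rcases lt_trichotomy a.2 b.2 with hlt | heq | hgt
      · have := countGt_strict_anti (pvDvals pd) a.2 b.2 hlt hmb
        omega
      · rw [heq] at h; omega
      · exact hgt
    · intro h
      have := countGt_strict_anti (pvDvals pd) b.2 a.2 h hma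
      omega
  simp [hiff]

-- B's change-detecting pass assigns exactly those ranks
theorem getLast?_le_of_pairwise (l : List Int) (h : List.Pairwise (fun a b => b ≤ a) l)
    (w : Int) (hw : l.getLast? = some w) : ∀ x ∈ l, w ≤ x := by
  induction l with
  | nil => simp at hw
  | cons x t ih =>
      cases t with
      | nil =>
          simp at hw
          intro y hy
          rcases List.mem_singleton.mp hy with rfl
          omega
      | cons y t' =>
          have hw' : (y :: t').getLast? = some w := by
            simpa [List.getLast?_cons_cons] using hw
          have htail := ih (List.pairwise_cons.mp h).2 hw'
          intro z hz
          rcases List.mem_cons.mp hz with rfl | hz'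
          · have hwmem : w ∈ y :: t' := List.mem_of_getLast? hw'
            exact (List.pairwise_cons.mp h).1 w hwmem
          · exact htail z hz' 

theorem bAssign_inv (W : List (String × Int))
    (hW : List.Pairwise (fun a b => b.2 ≤ a.2) W) (g : Int → Int)
    (hg : ∀ v ∈ W.map (fun p => p.2),
      g v = 1 + ((PySem.Set.ofList (W.map (fun p => p.2))).countP (fun w => decide (v < w)) : Int)) :
    ∀ (L done : List (String × Int)), done ++ L = W →
      bAssign L ((PySem.Set.ofList (done.map (fun p => p.2))).length : Int)
        (done.map (fun p => p.2)).getLast?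
      = L.map (fun kv => (kv.1, g kv.2)) := by
  intro L
  induction L with
  | nil => intro done _; rfl
  | cons hd L' ih =>
      obtain ⟨k, v⟩ := hd
      intro done hsplit
      have hW' : List.Pairwise (fun a b : String × Int => b.2 ≤ a.2) (done ++ (k, v) :: L') := by
        rw [hsplit]; exact hW
      obtain ⟨h1, h2, h3⟩ := List.pairwise_append.mp hW'
      have h4 : ∀ b ∈ L', b.2 ≤ v := fun b hb => (List.pairwise_cons.mp h2).1 b hb
      have hdge : ∀ x ∈ done, v ≤ x.2 := fun x hx => h3 x hx (k, v) (by simp)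
      set dv : List Int := done.map (fun p => p.2) with hdvdef
      have hdv_pair : List.Pairwise (fun a b => b ≤ a) dv := List.pairwise_map.mpr h1
      have hdge' : ∀ x ∈ dv, v ≤ x := by
        intro x hx
        obtain ⟨y, hy, rfl⟩ := List.mem_map.mp hx
        exact hdge y hy
      have hWvals : W.map (fun p => p.2) = dv ++ v :: L'.map (fun p => p.2) := by
        rw [← hsplit]; simp [hdvdef]
      have hvW : v ∈ W.map (fun p => p.2) := by rw [hWvals]; simp
      have hmem_iff : ∀ x, v < x → (x ∈ W.map (fun p => p.2) ↔ x ∈ dv) := by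
        intro x hx
        constructor
        · intro hxw
          rw [hWvals] at hxw
          rcases List.mem_append.mp hxw with h | h
          · exact h
          · rcases List.mem_cons.mp h with rfl | h'
            · exact absurd hx (lt_irrefl x)
            · obtain ⟨b, hb, rfl⟩ := List.mem_map.mp h'
              exact absurd hx (not_lt.mpr (h4 b hb))
        · intro hxd; rw [hWvals]; exact List.mem_append_left _ hxd
      set flt : List Int :=
        (PySem.Set.ofList (W.map (fun p => p.2))).filter (fun x => decide (v < x)) with hfltdef
      have hcountflt : (PySem.Set.ofList (W.map (fun p => p.2))).countP (fun w => decide (v < w))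
          = flt.length := List.countP_eq_length_filter
      have hnd1 : (PySem.Set.ofList dv).Nodup := PySem.Set.nodup_ofList _
      have hnd2 : flt.Nodup := (PySem.Set.nodup_ofList _).filter _
      have hfltmem : ∀ x, x ∈ flt ↔ (x ∈ W.map (fun p => p.2) ∧ v < x) := by
        intro x
        rw [hfltdef, List.mem_filter, PySem.Set.mem_ofList]
        simp
      have hvflt : v ∉ flt := by
        intro hv
        exact absurd ((hfltmem v).mp hv).2 (lt_irrefl v)
      have hgv : g v = 1 + (flt.length : Int) := by
        rw [hg v hvW, hcountflt]
      by_cases hvdv : v ∈ dv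
      · -- the previous sorted element has the same value: rank is unchanged
        have hprev : dv.getLast? = some v := by
          have hne : dv ≠ [] := List.ne_nil_of_mem hvdv
          have hw : dv.getLast? = some (dv.getLast hne) := List.getLast?_eq_some_getLast hne
          have hw1 : dv.getLast hne ≤ v :=
            getLast?_le_of_pairwise dv hdv_pair (dv.getLast hne) hw v hvdv
          have hw2 : v ≤ dv.getLast hne := hdge' _ (List.mem_of_getLast? hw)
          rw [hw, le_antisymm hw1 hw2]
        have hperm : (PySem.Set.ofList dv).Perm (v :: flt) := by
          refine (List.perm_ext_iff_of_nodup hnd1 (by simp [hnd2, hvflt])).mpr ?_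
          intro x
          rw [PySem.Set.mem_ofList]
          constructor
          · intro hx
            rcases lt_or_eq_of_le (hdge' x hx) with hlt | heq
            · exact List.mem_cons.mpr (Or.inr ((hfltmem x).mpr ⟨(hmem_iff x hlt).mpr hx, hlt⟩))
            · exact List.mem_cons.mpr (Or.inl heq.symm)
          · intro hx
            rcases List.mem_cons.mp hx with rfl | hx'
            · exact hvdv
            · obtain ⟨hmemW, hdec⟩ := (hfltmem x).mp hx'
              exact (hmem_iff x hdec).mp hmemW
        have hlen : (PySem.Set.ofList dv).length = 1 + flt.length := by
          simpa [Nat.add_comm] using hperm.length_eq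
        have hr : ((PySem.Set.ofList dv).length : Int) = g v := by
          rw [hgv, hlen]; push_cast; ring
        have hmap : (done ++ [(k, v)]).map (fun p => p.2) = dv ++ [v] := by simp [hdvdef]
        have hofl : PySem.Set.ofList (dv ++ [v]) = PySem.Set.ofList dv := by
          rw [PySem.Set.ofList_append_singleton,
            PySem.Set.add_of_mem ((PySem.Set.mem_ofList _ _).mpr hvdv)]
        have IH' := ih (done ++ [(k, v)]) (by rw [← hsplit]; simp)
        rw [hmap, hofl, List.getLast?_concat] at IH'
        simp only [bAssign, hprev, List.map_cons]
        rw [hr] at IH' ⊢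
        exact congrArg _ IH'
      · -- a strictly smaller value starts the next rank
        have hprevne : dv.getLast? ≠ some v := fun h => hvdv (List.mem_of_getLast? h)
        have hperm : (PySem.Set.ofList dv).Perm flt := by
          refine (List.perm_ext_iff_of_nodup hnd1 hnd2).mpr ?_
          intro x
          rw [PySem.Set.mem_ofList]
          constructor
          · intro hx
            rcases lt_or_eq_of_le (hdge' x hx) with hlt | heq
            · exact (hfltmem x).mpr ⟨(hmem_iff x hlt).mpr hx, hlt⟩
            · exact absurd (heq ▸ hx) hvdv
          · intro hx
            obtain ⟨hmemW, hdec⟩ := (hfltmem x).mp hx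
            exact (hmem_iff x hdec).mp hmemW
        have hlen : (PySem.Set.ofList dv).length = flt.length := hperm.length_eq
        have hr : ((PySem.Set.ofList dv).length : Int) + 1 = g v := by
          rw [hgv, hlen]; ring
        have hmap : (done ++ [(k, v)]).map (fun p => p.2) = dv ++ [v] := by simp [hdvdef]
        have hofl : PySem.Set.ofList (dv ++ [v]) = PySem.Set.ofList dv ++ [v] :=
          (PySem.Set.ofList_append_singleton dv v).trans
            (PySem.Set.add_of_not_mem (fun h => hvdv ((PySem.Set.mem_ofList _ _).mp h)))
        have IH' := ih (done ++ [(k, v)]) (by rw [← hsplit]; simp)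
        rw [hmap, hofl, List.getLast?_concat] at IH'
        have hcast : ((PySem.Set.ofList dv ++ [v]).length : Int)
            = ((PySem.Set.ofList dv).length : Int) + 1 := by
          simp
        rw [hcast] at IH'
        simp only [bAssign, if_neg hprevne, List.map_cons]
        rw [hr] at IH' ⊢
        exact congrArg _ IH'

theorem bRanked_eq (pd : List (String × Int)) :
    bAssign (PySem.List.sorted pd (fun kv => kv.2) true) 0 none = (pvS pd).map (pvF pd) := by
  have hW : List.Pairwise (fun a b : String × Int => b.2 ≤ a.2) (pvS pd) :=
    PySem.List.sorted_pairwise_rev pd (fun kv => kv.2)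
  have hg : ∀ v ∈ (pvS pd).map (fun p => p.2),
      pvG pd v = 1 + ((PySem.Set.ofList ((pvS pd).map (fun p => p.2))).countP
        (fun w => decide (v < w)) : Int) := by
    intro v hv
    have hperm : ((pvS pd).map (fun p => p.2)).Perm (pd.map (fun p => p.2)) :=
      (PySem.List.sorted_perm pd (fun kv => kv.2) true).map _
    have hv' : v ∈ pd.map (fun p => p.2) := hperm.mem_iff.mp hv
    rw [pvG_spec pd v hv']
    have h1 : (pvDvals pd).Perm (PySem.Set.ofList (pd.map (fun p => p.2))) :=
      PySem.List.sorted_perm _ _ _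
    have h2 : (PySem.Set.ofList ((pvS pd).map (fun p => p.2))).Perm
        (PySem.Set.ofList (pd.map (fun p => p.2))) := by
      refine (List.perm_ext_iff_of_nodup (PySem.Set.nodup_ofList _)
        (PySem.Set.nodup_ofList _)).mpr ?_
      intro x
      rw [PySem.Set.mem_ofList, PySem.Set.mem_ofList]
      exact hperm.mem_iff
    rw [h1.countP_eq, ← h2.countP_eq]
  exact bAssign_inv (pvS pd) hW (pvG pd) hg (pvS pd) [] rfl

-- assembly
theorem sorted_branch (pd : List (String × Int)) (h : (pd.map (fun kv => kv.1)).Nodup) :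
    aLoop (pd.map (pvF pd)).length ⟨pd.map (pvF pd)⟩ [] = (pvS pd).map (pvF pd) := by
  have hkeys : (pd.map (pvF pd)).map (fun kv => kv.1) = pd.map (fun kv => kv.1) := by
    rw [List.map_map]
    exact List.map_congr_left (fun kv _ => rfl)
  have hnd : ((pd.map (pvF pd)).map (fun kv => kv.1)).Nodup := by rw [hkeys]; exact h
  rw [aLoop_sorted _ _ [] rfl hnd]
  simp only [List.nil_append]
  exact sorted_map_antitone pd (pvG pd) (pvG_antitone pd)

theorem unsorted_branch (pd : List (String × Int)) (h : (pd.map (fun kv => kv.1)).Nodup) :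
    pd.map (fun kv => (kv.1, PySem.Dict.getD ⟨(pvS pd).map (pvF pd)⟩ kv.1 0)) = pd.map (pvF pd) := by
  apply List.map_congr_left
  intro kv hkv
  have hmemS : kv ∈ pvS pd := (PySem.List.mem_sorted pd (fun kv => kv.2) true kv).mpr hkv
  have hitem : (kv.1, pvG pd kv.2) ∈ (pvS pd).map (pvF pd) :=
    List.mem_map.mpr ⟨kv, hmemS, rfl⟩
  have hknd : (PySem.Dict.mk ((pvS pd).map (pvF pd)) : PySem.Dict String Int).keys.Nodup := by
    show (((pvS pd).map (pvF pd)).map (fun x => x.1)).Nodup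
    have heq : ((pvS pd).map (pvF pd)).map (fun x => x.1) = (pvS pd).map (fun kv => kv.1) := by
      rw [List.map_map]
      exact List.map_congr_left (fun kv _ => rfl)
    rw [heq]
    exact (((PySem.List.sorted_perm pd (fun kv => kv.2) true).map
      (fun kv : String × Int => kv.1)).nodup_iff).mpr h
  have hget := PySem.Dict.get?_of_mem_items ⟨(pvS pd).map (pvF pd)⟩ hitem hknd
  simp [PySem.Dict.getD, hget, pvF]

-- ===== VERDICT (by name: the statement is the Claim_ definition above) =====
theorem find_ranks_spec : Claim_equal_find_ranks := by
  intro pd rs _hdom hpre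
  unfold Spec_find_ranks find_ranks find_ranks_alt
  cases rs with
  | false =>
      dsimp only
      rw [if_neg (by decide : ¬ (false = true)), if_neg (by decide : ¬ (false = true)), bRanked_eq pd]
      exact (unsorted_branch pd hpre).symm
  | true =>
      dsimp only
      rw [if_pos rfl, if_pos rfl, bRanked_eq pd]
      exact sorted_branch pd hpre
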